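-- pv_equiv track=rewrite | github.com/nurnisi/algorithms-and-data-structures | codesignal/04-asana-tasksTypes.py | tasksTypes
-- ===== SOURCE A (Python) =====
-- def tasksTypes(deadlines, day):
--     ans = [0, 0, 0]
--     for d in deadlines:
--         if d <= day:
--             ans[0] += 1
--         elif day+1 <= d <= day+7:
--             ans[1] += 1
--         else:
--             ans[2] += 1
--     return ans
-- ===== SOURCE B (Python) =====
-- from bisect import bisect_right
--
-- def tasksTypes(deadlines, day):
--     s = sorted(deadlines)
--     c0 = bisect_right(s, day)
--     hi = bisect_right(s, day + 7)
--     return [c0, hi - c0, len(s) - hi]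
-- ===== Notes on version B (the rewrite author's own statement) =====
-- stated objective: alternative
-- what changed: Replaces the per-element if/elif/else counting loop with sort-then-bisect: the three bucket counts are read off two bisect_right positions in the sorted deadline list.
import Mathlib
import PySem

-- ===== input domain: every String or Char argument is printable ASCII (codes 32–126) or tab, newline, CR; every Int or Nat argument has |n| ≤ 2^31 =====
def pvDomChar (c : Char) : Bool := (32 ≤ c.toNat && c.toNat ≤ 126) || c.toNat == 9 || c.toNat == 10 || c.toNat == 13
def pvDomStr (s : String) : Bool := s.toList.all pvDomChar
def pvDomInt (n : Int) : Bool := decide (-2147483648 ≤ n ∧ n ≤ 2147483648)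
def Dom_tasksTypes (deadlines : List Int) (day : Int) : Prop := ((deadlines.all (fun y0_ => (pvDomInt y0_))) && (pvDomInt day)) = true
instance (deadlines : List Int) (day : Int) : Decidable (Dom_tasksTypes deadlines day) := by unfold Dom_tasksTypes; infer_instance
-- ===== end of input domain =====

-- B replaces A's per-element if/elif/else counting loop with sort-then-bisect; alternative decomposition, not claimed faster.

-- ===== PORT A =====
-- ans = [0,0,0]; for d in deadlines: …  — the three-cell list is carried as a triple, each branch bumps one cell
def tasksTypes (deadlines : List Int) (day : Int) : List Int :=
  let ans := deadlines.foldl (fun (ans : Int × Int × Int) d =>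
    if d ≤ day then (ans.1 + 1, ans.2.1, ans.2.2)
    else if day + 1 ≤ d ∧ d ≤ day + 7 then (ans.1, ans.2.1 + 1, ans.2.2)
    else (ans.1, ans.2.1, ans.2.2 + 1)) (0, 0, 0)
  [ans.1, ans.2.1, ans.2.2]

-- ===== PORT B =====
def tasksTypes_alt (deadlines : List Int) (day : Int) : List Int :=
  let s := PySem.List.sorted deadlines (fun x => x) false
  let c0 : Int := PySem.List.bisectRight s day
  let hi : Int := PySem.List.bisectRight s (day + 7)
  [c0, hi - c0, (s.length : Int) - hi]

-- ===== PRECONDITION & SPEC =====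
def Spec_tasksTypes (deadlines : List Int) (day : Int) (out : List Int) : Prop := out = tasksTypes_alt deadlines day
instance (deadlines : List Int) (day : Int) (out : List Int) : Decidable (Spec_tasksTypes deadlines day out) := by unfold Spec_tasksTypes; infer_instance

-- ===== CLAIM (what is proved, stated in full; the proofs are below) =====
def Claim_equal_tasksTypes : Prop := ∀ (deadlines : List Int) (day : Int), Dom_tasksTypes deadlines day → Spec_tasksTypes deadlines day (tasksTypes deadlines day)

-- ===== LEMMAS AND PROOFS =====

-- A's loop computes the three bucket counts
lemma tasksTypes_foldl (day : Int) : ∀ (l : List Int) (a b c : Int),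
    l.foldl (fun (ans : Int × Int × Int) d =>
      if d ≤ day then (ans.1 + 1, ans.2.1, ans.2.2)
      else if day + 1 ≤ d ∧ d ≤ day + 7 then (ans.1, ans.2.1 + 1, ans.2.2)
      else (ans.1, ans.2.1, ans.2.2 + 1)) (a, b, c)
    = (a + l.countP (fun d => d ≤ day),
       b + l.countP (fun d => day < d ∧ d ≤ day + 7),
       c + l.countP (fun d => day + 7 < d)) := by
  intro l
  induction l with
  | nil => intro a b c; simp
  | cons x t ih =>
    intro a b c
    simp only [List.foldl_cons, List.countP_cons]
    by_cases h1 : x ≤ day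
    · simp only [if_pos h1, ih]
      have h2 : ¬ (day < x ∧ x ≤ day + 7) := by omega
      have h3 : ¬ (day + 7 < x) := by omega
      simp [h1, h2, h3]; omega
    · by_cases h2 : day + 1 ≤ x ∧ x ≤ day + 7
      · simp only [if_neg h1, if_pos h2, ih]
        have h2' : day < x ∧ x ≤ day + 7 := by omega
        have h3 : ¬ (day + 7 < x) := by omega
        simp [h1, h2', h3]; omega
      · simp only [if_neg h1, if_neg h2, ih]
        have h2' : ¬ (day < x ∧ x ≤ day + 7) := by omega
        have h3 : day + 7 < x := by omega
        simp [h1, h2', h3]; omega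

-- bisect_right on a ≤-sorted list is the count of elements ≤ x
lemma bisectRight_eq_countP (s : List Int) (x : Int)
    (hs : s.Pairwise (fun a b => a ≤ b)) :
    PySem.List.bisectRight s x = s.countP (fun d => d ≤ x) := by
  obtain ⟨hlen, hbefore, hafter⟩ := PySem.List.bisectRight_spec s x hs
  set k := PySem.List.bisectRight s x with hk
  have := List.take_append_drop k s
  symm
  calc s.countP (fun d => d ≤ x)
      = ((s.take k) ++ (s.drop k)).countP (fun d => d ≤ x) := by rw [this]
    _ = (s.take k).countP (fun d => d ≤ x) + (s.drop k).countP (fun d => d ≤ x) := by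
        rw [List.countP_append]
    _ = (s.take k).length + 0 := by
        congr 1
        · apply List.countP_eq_length.mpr
          intro a ha
          rw [List.mem_take_iff_getElem] at ha
          obtain ⟨i, hi, rfl⟩ := ha
          simpa using hbefore i (by omega) (by omega)
        · apply List.countP_eq_zero.mpr
          intro a ha
          rw [List.mem_drop_iff_getElem] at ha
          obtain ⟨i, hi, rfl⟩ := ha
          have := hafter (k + i) (by omega) (by omega)
          simpa using by omega
    _ = k := by simp [List.length_take]; omega

lemma countP_split (day : Int) (l : List Int) :
    l.countP (fun d => d ≤ day + 7)
      = l.countP (fun d => d ≤ day) + l.countP (fun d => day < d ∧ d ≤ day + 7) := by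
  induction l with
  | nil => simp
  | cons x t ih =>
    simp only [List.countP_cons, ih]
    split_ifs with h1 h2 <;>
      simp only [decide_eq_true_eq, not_and, not_le] at * <;> omega

lemma countP_later (day : Int) (l : List Int) :
    l.countP (fun d => day + 7 < d)
      = l.length - l.countP (fun d => d ≤ day + 7) := by
  induction l with
  | nil => simp
  | cons x t ih =>
    simp only [List.countP_cons, List.length_cons, ih]
    have h1 : t.countP (fun d => d ≤ day + 7) ≤ t.length := List.countP_le_length
    split_ifs with h2 h3 <;>
      simp only [decide_eq_true_eq, not_lt, not_le] at * <;> omega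

-- ===== VERDICT (by name: the statement is the Claim_ definition above) =====
theorem tasksTypes_spec : Claim_equal_tasksTypes := by
  intro deadlines day _
  unfold Spec_tasksTypes tasksTypes tasksTypes_alt
  set s := PySem.List.sorted deadlines (fun x => x) false with hs
  have hpair : s.Pairwise (fun a b => a ≤ b) := by
    simpa using PySem.List.sorted_pairwise deadlines (fun x => x)
  have hperm : s.Perm deadlines := PySem.List.sorted_perm deadlines (fun x => x) false
  have hlen : s.length = deadlines.length := hperm.length_eq
  have hc0 : PySem.List.bisectRight s day = deadlines.countP (fun d => d ≤ day) := by
    rw [bisectRight_eq_countP s day hpair, hperm.countP_eq]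
  have hc7 : PySem.List.bisectRight s (day + 7) = deadlines.countP (fun d => d ≤ day + 7) := by
    rw [bisectRight_eq_countP s (day + 7) hpair, hperm.countP_eq]
  have e1 := countP_split day deadlines
  have e2 := countP_later day deadlines
  have h1 : deadlines.countP (fun d => d ≤ day + 7) ≤ deadlines.length := List.countP_le_length
  have m2 : (deadlines.countP (fun d => day < d ∧ d ≤ day + 7) : Int)
      = (deadlines.countP (fun d => d ≤ day + 7) : Int) - (deadlines.countP (fun d => d ≤ day) : Int) := by
    omega
  have m3 : (deadlines.countP (fun d => day + 7 < d) : Int)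
      = (deadlines.length : Int) - (deadlines.countP (fun d => d ≤ day + 7) : Int) := by
    omega
  simp only [tasksTypes_foldl day deadlines 0 0 0, zero_add, hc0, hc7, hlen, m2, m3]
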